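-- pv_equiv track=rewrite | github.com/rn434/haneeflab | pte-causes-of-mortality/icd-to-cause.py | map_to_causes
-- ===== SOURCE A (Python) =====
-- def map_to_causes(icd_code: str, icd_dict: dict[tuple, str]) -> list:
--     causes = ["", "", "", ""]
--     for current_level in ["1", "2", "3", "4"]:
--         for icd_start_end_level, cause in icd_dict.items():
--             icd_start, icd_end, level = icd_start_end_level
--             if level != current_level:
--                 continue
--             if icd_start < icd_code < icd_end:
--                 causes[int(level) - 1] = cause
--                 break
--     return causes
-- ===== SOURCE B (Python) =====
-- def map_to_causes(icd_code: str, icd_dict: dict[tuple, str]) -> list: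
--     causes = ["", "", "", ""]
--     filled = set()
--     for (icd_start, icd_end, level), cause in icd_dict.items():
--         if level in ("1", "2", "3", "4") and level not in filled and icd_start < icd_code < icd_end:
--             causes[int(level) - 1] = cause
--             filled.add(level)
--     return causes
-- ===== Notes on version B (the rewrite author's own statement) =====
-- stated objective: alternative
-- what changed: Replaces the four level-passes over the dict (one scan per level with break) by a single pass over icd_dict.items() that maintains a set of already-filled levels, so each entry is examined once.
import Mathlib
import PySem

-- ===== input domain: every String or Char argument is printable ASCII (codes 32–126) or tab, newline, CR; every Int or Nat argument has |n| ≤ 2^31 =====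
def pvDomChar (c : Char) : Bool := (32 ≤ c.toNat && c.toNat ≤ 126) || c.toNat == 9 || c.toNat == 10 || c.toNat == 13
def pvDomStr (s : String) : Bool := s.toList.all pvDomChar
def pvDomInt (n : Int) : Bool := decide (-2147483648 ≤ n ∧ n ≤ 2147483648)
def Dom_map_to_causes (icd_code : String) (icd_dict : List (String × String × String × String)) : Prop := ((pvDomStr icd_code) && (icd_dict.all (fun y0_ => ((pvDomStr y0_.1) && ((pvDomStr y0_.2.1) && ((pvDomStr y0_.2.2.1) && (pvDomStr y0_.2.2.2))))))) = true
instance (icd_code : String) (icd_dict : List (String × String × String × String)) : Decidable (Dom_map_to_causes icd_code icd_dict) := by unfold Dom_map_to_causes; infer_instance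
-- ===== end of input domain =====

-- B replaces A's four level-passes over the dict by a single pass keeping a set of filled levels; same return value on every input.


-- ===== PORT A =====
-- A's inner 'for … items(): continue / break' loop for one fixed current_level:
-- returns the cause at the first entry of that level whose interval strictly contains icd_code.
def pvAInner (icd_code current_level : String) : List (String × String × String × String) → Option String
  | [] => none
  | (icd_start, icd_end, level, cause) :: rest =>
    if level ≠ current_level then pvAInner icd_code current_level rest
    else if icd_start < icd_code ∧ icd_code < icd_end then some cause
    else pvAInner icd_code current_level rest

-- int(level) - 1 as a list index; at every reachable call level ∈ {"1","2","3","4"}, so the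
-- value is 0..3 and .toNat is exact (Python never sees a negative index here).
def pvLevelIdx (level : String) : Nat := ((PySem.Int.ofStr? level).getD 0 - 1).toNat

def map_to_causes (icd_code : String) (icd_dict : List (String × String × String × String)) : List String :=
  ["1", "2", "3", "4"].foldl (fun causes current_level =>
    match pvAInner icd_code current_level icd_dict with
    | some cause => causes.set (pvLevelIdx current_level) cause
    | none => causes) ["", "", "", ""]

-- ===== PORT B =====
def pvBStep (icd_code : String) (st : List String × PySem.Set String) (it : String × String × String × String) : List String × PySem.Set String :=
  let (icd_start, icd_end, level, cause) := it
  if (level = "1" ∨ level = "2" ∨ level = "3" ∨ level = "4") ∧ ¬ PySem.Set.contains st.2 level = true ∧ icd_start < icd_code ∧ icd_code < icd_end then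
    (st.1.set (pvLevelIdx level) cause, PySem.Set.add st.2 level)
  else st

def map_to_causes_alt (icd_code : String) (icd_dict : List (String × String × String × String)) : List String :=
  (icd_dict.foldl (pvBStep icd_code) (["", "", "", ""], PySem.Set.empty)).1

-- ===== PRECONDITION & SPEC =====
def Spec_map_to_causes (icd_code : String) (icd_dict : List (String × String × String × String)) (out : List String) : Prop := out = map_to_causes_alt icd_code icd_dict
instance (icd_code : String) (icd_dict : List (String × String × String × String)) (out : List String) : Decidable (Spec_map_to_causes icd_code icd_dict out) := by unfold Spec_map_to_causes; infer_instance

-- ===== CLAIM (what is proved, stated in full; the proofs are below) =====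
def Claim_equal_map_to_causes : Prop := ∀ (icd_code : String) (icd_dict : List (String × String × String × String)), Dom_map_to_causes icd_code icd_dict → Spec_map_to_causes icd_code icd_dict (map_to_causes icd_code icd_dict)

-- ===== LEMMAS AND PROOFS =====

-- the level string written at index i by A's chain (inverse of pvLevelIdx on {"1",…,"4"})
def pvLvlOf : Nat → String
  | 0 => "1" | 1 => "2" | 2 => "3" | _ => "4"

theorem pvIdx_lvlOf : ∀ i < 4, pvLevelIdx (pvLvlOf i) = i := by decide

theorem pvB_len (icd_code : String) (dict : List (String × String × String × String)) :
    ∀ st : List String × PySem.Set String, (dict.foldl (pvBStep icd_code) st).1.length = st.1.length := by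
  induction dict with
  | nil => intro st; rfl
  | cons it rest ih =>
    intro st
    obtain ⟨s, e, l, c⟩ := it
    simp only [List.foldl_cons]
    rw [ih]
    simp only [pvBStep]
    split_ifs <;> simp

theorem pvB_at (icd_code : String) (dict : List (String × String × String × String)) :
    ∀ (cs : List String) (F : PySem.Set String) (i : Nat), i < 4 → cs.length = 4 →
    ((dict.foldl (pvBStep icd_code) (cs, F)).1)[i]? =
      (if PySem.Set.contains F (pvLvlOf i) then cs[i]?
       else match pvAInner icd_code (pvLvlOf i) dict with
            | some c => some c
            | none => cs[i]?) := by
  induction dict with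
  | nil =>
    intro cs F i hi hlen
    simp [pvAInner]
  | cons it rest ih =>
    intro cs F i hi hlen
    obtain ⟨s, e, l, c⟩ := it
    simp only [List.foldl_cons, pvBStep]
    by_cases hg : (l = "1" ∨ l = "2" ∨ l = "3" ∨ l = "4") ∧ ¬ PySem.Set.contains F l = true ∧ s < icd_code ∧ icd_code < e
    · rw [if_pos hg]
      obtain ⟨hl4, hFl, hs, he⟩ := hg
      by_cases hli : l = pvLvlOf i
      · -- this entry fills exactly level i
        subst hli
        rw [ih _ _ i hi (by simp [hlen])]
        have hmem : PySem.Set.contains (PySem.Set.add F (pvLvlOf i)) (pvLvlOf i) = true := by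
          simp only [PySem.Set.add, PySem.Set.contains]
          split_ifs with h
          · exact h
          · simp
        rw [if_pos hmem, if_neg hFl]
        have hhd : pvAInner icd_code (pvLvlOf i) ((s, e, pvLvlOf i, c) :: rest) = some c := by
          simp [pvAInner, hs, he]
        rw [hhd, pvIdx_lvlOf i hi, List.getElem?_set_self (by omega)]
      · -- entry for a different level: index i untouched, membership of lvlOf i unchanged
        rw [ih _ _ i hi (by simp [hlen])]
        have hne : pvLevelIdx l ≠ i := by
          rcases hl4 with h | h | h | h <;> subst h <;>
            (interval_cases i <;> simp_all [pvLevelIdx, pvLvlOf]) <;> decide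
        have hmem : PySem.Set.contains (PySem.Set.add F l) (pvLvlOf i) = PySem.Set.contains F (pvLvlOf i) := by
          simp only [PySem.Set.add, PySem.Set.contains]
          split_ifs with h
          · rfl
          · simp only [List.contains_append, List.contains_cons, List.contains_nil]
            have : ((pvLvlOf i) == l) = false := by
              simp
              intro h'; exact hli h'.symm
            simp [this]
        rw [hmem]
        have hskip : pvAInner icd_code (pvLvlOf i) ((s, e, l, c) :: rest) = pvAInner icd_code (pvLvlOf i) rest := by
          simp [pvAInner, hli]
        rw [hskip, List.getElem?_set_ne hne]
    · rw [if_neg hg]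
      rw [ih _ _ i hi hlen]
      have hskip : pvAInner icd_code (pvLvlOf i) ((s, e, l, c) :: rest) = pvAInner icd_code (pvLvlOf i) rest ∨ (PySem.Set.contains F (pvLvlOf i) = true ∧ l = pvLvlOf i) := by
        by_cases hli : l = pvLvlOf i
        · subst hli
          by_cases hF : PySem.Set.contains F (pvLvlOf i) = true
          · exact Or.inr ⟨hF, rfl⟩
          · left
            have hlvl : pvLvlOf i = "1" ∨ pvLvlOf i = "2" ∨ pvLvlOf i = "3" ∨ pvLvlOf i = "4" := by
              interval_cases i <;> simp [pvLvlOf]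
            have hint : ¬ (s < icd_code ∧ icd_code < e) := by
              intro hiv; exact hg ⟨hlvl, hF, hiv⟩
            simp only [pvAInner, ne_eq, not_true_eq_false, if_false, if_neg hint]
        · left; simp [pvAInner, hli]
      rcases hskip with h | ⟨hF, hl⟩
      · rw [h]
      · rw [if_pos hF, if_pos hF]

theorem pvIdx1 : pvLevelIdx "1" = 0 := by decide
theorem pvIdx2 : pvLevelIdx "2" = 1 := by decide
theorem pvIdx3 : pvLevelIdx "3" = 2 := by decide
theorem pvIdx4 : pvLevelIdx "4" = 3 := by decide

theorem pvA_at (icd_code : String) (dict : List (String × String × String × String)) :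
    ∀ i, i < 4 →
    (map_to_causes icd_code dict)[i]? =
      (match pvAInner icd_code (pvLvlOf i) dict with
       | some c => some c
       | none => some "") := by
  intro i hi
  unfold map_to_causes
  simp only [List.foldl_cons, List.foldl_nil]
  rcases h1 : pvAInner icd_code "1" dict with _ | c1 <;>
  rcases h2 : pvAInner icd_code "2" dict with _ | c2 <;>
  rcases h3 : pvAInner icd_code "3" dict with _ | c3 <;>
  rcases h4 : pvAInner icd_code "4" dict with _ | c4 <;>
    simp only [pvIdx1, pvIdx2, pvIdx3, pvIdx4] <;>
    interval_cases i <;>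
    simp_all [pvLvlOf]

theorem pvA_len (icd_code : String) (dict : List (String × String × String × String)) :
    (map_to_causes icd_code dict).length = 4 := by
  unfold map_to_causes
  simp only [List.foldl_cons, List.foldl_nil]
  rcases pvAInner icd_code "1" dict <;>
  rcases pvAInner icd_code "2" dict <;>
  rcases pvAInner icd_code "3" dict <;>
  rcases pvAInner icd_code "4" dict <;> simp

-- ===== VERDICT (by name: the statement is the Claim_ definition above) =====
theorem map_to_causes_spec : Claim_equal_map_to_causes := by
  intro icd_code icd_dict _
  unfold Spec_map_to_causes
  apply List.ext_getElem?
  intro i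
  by_cases hi : i < 4
  · rw [pvA_at icd_code icd_dict i hi]
    unfold map_to_causes_alt
    rw [pvB_at icd_code icd_dict _ _ i hi rfl]
    have hF : PySem.Set.contains PySem.Set.empty (pvLvlOf i) = false := by
      simp [PySem.Set.empty, PySem.Set.contains]
    rw [hF]
    simp only [Bool.false_eq_true, if_false]
    rcases pvAInner icd_code (pvLvlOf i) icd_dict with _ | c
    · simp; interval_cases i <;> rfl
    · simp
  · have hA : (map_to_causes icd_code icd_dict).length ≤ i := by
      rw [pvA_len]; omega
    have hB : (map_to_causes_alt icd_code icd_dict).length ≤ i := by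
      unfold map_to_causes_alt
      rw [pvB_len]; simpa using Nat.le_of_not_lt hi
    rw [List.getElem?_eq_none hA, List.getElem?_eq_none hB]
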